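-- pv_equiv track=rewrite | github.com/ram-prasad-sahoo/astrava | utils/risk_calculator.py | calculate_business_impact
-- ===== SOURCE A (Python) =====
-- from typing import Dict, List, Any
--
-- def calculate_business_impact(risk_score: int, vulnerabilities: List[Dict[str, Any]]) -> Dict[str, Any]:
--     """Calculate business impact assessment"""
--
--     impact = {
--         'confidentiality': 'Low',
--         'integrity': 'Low',
--         'availability': 'Low',
--         'financial_impact': 'Low',
--         'regulatory_impact': 'Low',
--         'reputation_impact': 'Low'
--     }
--
--     # Analyze vulnerability types for impact assessment
--     vuln_types = [v.get('type', '').lower() for v in vulnerabilities]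
--
--     # Confidentiality impact
--     if any(vt in ['sql injection', 'path traversal', 'information disclosure', 'ssrf'] for vt in vuln_types):
--         if risk_score >= 70:
--             impact['confidentiality'] = 'High'
--         elif risk_score >= 40:
--             impact['confidentiality'] = 'Medium'
--
--     # Integrity impact
--     if any(vt in ['sql injection', 'command injection', 'file upload', 'xss'] for vt in vuln_types):
--         if risk_score >= 70:
--             impact['integrity'] = 'High'
--         elif risk_score >= 40:
--             impact['integrity'] = 'Medium'
--
--     # Availability impact
--     if any(vt in ['command injection', 'denial of service', 'resource exhaustion'] for vt in vuln_types):
--         if risk_score >= 70: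
--             impact['availability'] = 'High'
--         elif risk_score >= 40:
--             impact['availability'] = 'Medium'
--
--     # Financial impact (based on overall risk)
--     if risk_score >= 80:
--         impact['financial_impact'] = 'High'
--     elif risk_score >= 50:
--         impact['financial_impact'] = 'Medium'
--
--     # Regulatory impact (data protection vulnerabilities)
--     data_protection_vulns = ['sql injection', 'information disclosure', 'authentication bypass']
--     if any(vt in data_protection_vulns for vt in vuln_types):
--         if risk_score >= 60:
--             impact['regulatory_impact'] = 'High'
--         elif risk_score >= 30:
--             impact['regulatory_impact'] = 'Medium'
--
--     # Reputation impact
--     if risk_score >= 70: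
--         impact['reputation_impact'] = 'High'
--     elif risk_score >= 40:
--         impact['reputation_impact'] = 'Medium'
--
--     return impact
-- ===== SOURCE B (Python) =====
-- # Inverted index: vuln type -> which impact dimensions it triggers.
-- _TRIGGERS = {
--     'sql injection': ('confidentiality', 'integrity', 'regulatory_impact'),
--     'path traversal': ('confidentiality',),
--     'information disclosure': ('confidentiality', 'regulatory_impact'),
--     'ssrf': ('confidentiality',),
--     'command injection': ('integrity', 'availability'),
--     'file upload': ('integrity',),
--     'xss': ('integrity',),
--     'denial of service': ('availability',),
--     'resource exhaustion': ('availability',),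
--     'authentication bypass': ('regulatory_impact',),
-- }
--
-- # Per-dimension (high, medium) score thresholds, in output order.
-- _THRESHOLDS = [
--     ('confidentiality', 70, 40),
--     ('integrity', 70, 40),
--     ('availability', 70, 40),
--     ('financial_impact', 80, 50),
--     ('regulatory_impact', 60, 30),
--     ('reputation_impact', 70, 40),
-- ]
--
-- def calculate_business_impact(risk_score, vulnerabilities):
--     """Calculate business impact assessment (inverted type->dimension index, single pass)."""
--     # financial and reputation impact depend on the score alone.
--     triggered = {'financial_impact', 'reputation_impact'}
--     for v in vulnerabilities:
--         triggered.update(_TRIGGERS.get(v.get('type', '').lower(), ()))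
--     impact = {}
--     for key, high, medium in _THRESHOLDS:
--         if key in triggered and risk_score >= high:
--             impact[key] = 'High'
--         elif key in triggered and risk_score >= medium:
--             impact[key] = 'Medium'
--         else:
--             impact[key] = 'Low'
--     return impact
-- ===== Notes on version B (the rewrite author's own statement) =====
-- stated objective: alternative
-- what changed: Replaces A's six keyword-list scans over the vuln types with an inverted index (vuln type -> impacted dimensions) accumulated into a triggered-dimension set in a single pass, then one threshold loop builds the result.
import Mathlib
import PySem

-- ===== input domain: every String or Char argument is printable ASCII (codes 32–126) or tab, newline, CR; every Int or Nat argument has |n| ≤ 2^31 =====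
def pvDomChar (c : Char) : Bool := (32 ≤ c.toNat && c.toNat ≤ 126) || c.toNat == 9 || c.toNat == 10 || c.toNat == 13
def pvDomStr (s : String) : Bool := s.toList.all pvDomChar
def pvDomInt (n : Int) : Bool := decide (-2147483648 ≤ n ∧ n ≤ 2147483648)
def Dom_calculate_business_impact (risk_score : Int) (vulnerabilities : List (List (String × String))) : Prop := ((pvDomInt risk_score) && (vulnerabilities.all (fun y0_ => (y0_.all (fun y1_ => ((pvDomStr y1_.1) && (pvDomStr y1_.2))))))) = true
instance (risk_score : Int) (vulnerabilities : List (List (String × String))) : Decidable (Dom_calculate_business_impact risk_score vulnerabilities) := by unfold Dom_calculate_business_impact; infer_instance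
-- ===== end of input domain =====

-- ===== PORT A =====
-- B replaces A's six keyword-list scans with an inverted type->dimensions index and a single
-- accumulation pass; no speed claim. Equivalence of the RETURN value is proved below.
def calculate_business_impact (risk_score : Int) (vulnerabilities : List (List (String × String))) : List (String × String) :=
  let impact : PySem.Dict String String := PySem.Dict.ofList
    [("confidentiality", "Low"), ("integrity", "Low"), ("availability", "Low"),
     ("financial_impact", "Low"), ("regulatory_impact", "Low"), ("reputation_impact", "Low")]
  let vuln_types : List String :=
    vulnerabilities.map (fun v => PySem.Str.lower ((PySem.Dict.mk v).getD "type" ""))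
  -- Confidentiality impact
  let impact :=
    if vuln_types.any (fun vt => vt ∈ ["sql injection", "path traversal", "information disclosure", "ssrf"]) then
      if risk_score ≥ 70 then impact.insert "confidentiality" "High"
      else if risk_score ≥ 40 then impact.insert "confidentiality" "Medium"
      else impact
    else impact
  -- Integrity impact
  let impact :=
    if vuln_types.any (fun vt => vt ∈ ["sql injection", "command injection", "file upload", "xss"]) then
      if risk_score ≥ 70 then impact.insert "integrity" "High"
      else if risk_score ≥ 40 then impact.insert "integrity" "Medium"
      else impact
    else impact
  -- Availability impact
  let impact :=
    if vuln_types.any (fun vt => vt ∈ ["command injection", "denial of service", "resource exhaustion"]) then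
      if risk_score ≥ 70 then impact.insert "availability" "High"
      else if risk_score ≥ 40 then impact.insert "availability" "Medium"
      else impact
    else impact
  -- Financial impact (based on overall risk)
  let impact :=
    if risk_score ≥ 80 then impact.insert "financial_impact" "High"
    else if risk_score ≥ 50 then impact.insert "financial_impact" "Medium"
    else impact
  -- Regulatory impact (data protection vulnerabilities)
  let data_protection_vulns := ["sql injection", "information disclosure", "authentication bypass"]
  let impact :=
    if vuln_types.any (fun vt => vt ∈ data_protection_vulns) then
      if risk_score ≥ 60 then impact.insert "regulatory_impact" "High"
      else if risk_score ≥ 30 then impact.insert "regulatory_impact" "Medium"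
      else impact
    else impact
  -- Reputation impact
  let impact :=
    if risk_score ≥ 70 then impact.insert "reputation_impact" "High"
    else if risk_score ≥ 40 then impact.insert "reputation_impact" "Medium"
    else impact
  impact.items

-- ===== PORT B =====
-- inverted index: vuln type -> the impact dimensions it triggers
def pvTriggers : PySem.Dict String (List String) := PySem.Dict.mk
  [("sql injection", ["confidentiality", "integrity", "regulatory_impact"]),
   ("path traversal", ["confidentiality"]),
   ("information disclosure", ["confidentiality", "regulatory_impact"]),
   ("ssrf", ["confidentiality"]),
   ("command injection", ["integrity", "availability"]),
   ("file upload", ["integrity"]),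
   ("xss", ["integrity"]),
   ("denial of service", ["availability"]),
   ("resource exhaustion", ["availability"]),
   ("authentication bypass", ["regulatory_impact"])]

-- per-dimension (high, medium) thresholds, in output order
def pvThresholds : List (String × Int × Int) :=
  [("confidentiality", 70, 40), ("integrity", 70, 40), ("availability", 70, 40),
   ("financial_impact", 80, 50), ("regulatory_impact", 60, 30), ("reputation_impact", 70, 40)]

def calculate_business_impact_alt (risk_score : Int) (vulnerabilities : List (List (String × String))) : List (String × String) :=
  let triggered : PySem.Set String :=
    vulnerabilities.foldl
      (fun s v => PySem.Set.update s
        (pvTriggers.getD (PySem.Str.lower ((PySem.Dict.mk v).getD "type" "")) []))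
      (PySem.Set.ofList ["financial_impact", "reputation_impact"])
  (pvThresholds.foldl
    (fun (impact : PySem.Dict String String) e =>
      if triggered.contains e.1 && risk_score ≥ e.2.1 then impact.insert e.1 "High"
      else if triggered.contains e.1 && risk_score ≥ e.2.2 then impact.insert e.1 "Medium"
      else impact.insert e.1 "Low")
    PySem.Dict.empty).items

-- ===== PRECONDITION & SPEC =====
def Spec_calculate_business_impact (risk_score : Int) (vulnerabilities : List (List (String × String))) (out : List (String × String)) : Prop := out = calculate_business_impact_alt risk_score vulnerabilities
instance (risk_score : Int) (vulnerabilities : List (List (String × String))) (out : List (String × String)) : Decidable (Spec_calculate_business_impact risk_score vulnerabilities out) := by unfold Spec_calculate_business_impact; infer_instance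

-- ===== CLAIM (what is proved, stated in full; the proofs are below) =====
def Claim_equal_calculate_business_impact : Prop := ∀ (risk_score : Int) (vulnerabilities : List (List (String × String))), Dom_calculate_business_impact risk_score vulnerabilities → Spec_calculate_business_impact risk_score vulnerabilities (calculate_business_impact risk_score vulnerabilities)

-- ===== LEMMAS AND PROOFS =====
-- Membership in B's accumulated triggered set ↔ the initial seed or some type triggers the key.
theorem pv_mem_tacc (k : String) (init : PySem.Set String) (ts : List String) :
    k ∈ ts.foldl (fun s t => PySem.Set.update s (pvTriggers.getD t [])) init ↔
      k ∈ init ∨ ∃ t ∈ ts, k ∈ pvTriggers.getD t [] := by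
  induction ts generalizing init with
  | nil => simp
  | cons t ts ih =>
    simp only [List.foldl_cons, ih, PySem.Set.mem_update, List.mem_cons]
    constructor
    · rintro ((h | h) | ⟨t', ht', hk⟩)
      · exact Or.inl h
      · exact Or.inr ⟨t, Or.inl rfl, h⟩
      · exact Or.inr ⟨t', Or.inr ht', hk⟩
    · rintro (h | ⟨t', (rfl | ht'), hk⟩)
      · exact Or.inl (Or.inl h)
      · exact Or.inl (Or.inr hk)
      · exact Or.inr ⟨t', ht', hk⟩

-- Inverting the index: which types contribute each dimension.
theorem pv_trig_conf (t : String) :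
    "confidentiality" ∈ pvTriggers.getD t [] ↔
      t ∈ ["sql injection", "path traversal", "information disclosure", "ssrf"] := by
  by_cases h1 : t = "sql injection"
  · subst h1; decide
  by_cases h2 : t = "path traversal"
  · subst h2; decide
  by_cases h3 : t = "information disclosure"
  · subst h3; decide
  by_cases h4 : t = "ssrf"
  · subst h4; decide
  by_cases h5 : t = "command injection"
  · subst h5; decide
  by_cases h6 : t = "file upload"
  · subst h6; decide
  by_cases h7 : t = "xss"
  · subst h7; decide
  by_cases h8 : t = "denial of service"
  · subst h8; decide
  by_cases h9 : t = "resource exhaustion"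
  · subst h9; decide
  by_cases h10 : t = "authentication bypass"
  · subst h10; decide
  simp [pvTriggers, PySem.Dict.getD, PySem.Dict.get?, h1, h2, h3, h4, h5, h6, h7, h8, h9, h10, Ne.symm h1, Ne.symm h2, Ne.symm h3, Ne.symm h4, Ne.symm h5, Ne.symm h6, Ne.symm h7, Ne.symm h8, Ne.symm h9, Ne.symm h10]

theorem pv_trig_integ (t : String) :
    "integrity" ∈ pvTriggers.getD t [] ↔
      t ∈ ["sql injection", "command injection", "file upload", "xss"] := by
  by_cases h1 : t = "sql injection"
  · subst h1; decide
  by_cases h2 : t = "path traversal"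
  · subst h2; decide
  by_cases h3 : t = "information disclosure"
  · subst h3; decide
  by_cases h4 : t = "ssrf"
  · subst h4; decide
  by_cases h5 : t = "command injection"
  · subst h5; decide
  by_cases h6 : t = "file upload"
  · subst h6; decide
  by_cases h7 : t = "xss"
  · subst h7; decide
  by_cases h8 : t = "denial of service"
  · subst h8; decide
  by_cases h9 : t = "resource exhaustion"
  · subst h9; decide
  by_cases h10 : t = "authentication bypass"
  · subst h10; decide
  simp [pvTriggers, PySem.Dict.getD, PySem.Dict.get?, h1, h2, h3, h4, h5, h6, h7, h8, h9, h10, Ne.symm h1, Ne.symm h2, Ne.symm h3, Ne.symm h4, Ne.symm h5, Ne.symm h6, Ne.symm h7, Ne.symm h8, Ne.symm h9, Ne.symm h10]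

theorem pv_trig_avail (t : String) :
    "availability" ∈ pvTriggers.getD t [] ↔
      t ∈ ["command injection", "denial of service", "resource exhaustion"] := by
  by_cases h1 : t = "sql injection"
  · subst h1; decide
  by_cases h2 : t = "path traversal"
  · subst h2; decide
  by_cases h3 : t = "information disclosure"
  · subst h3; decide
  by_cases h4 : t = "ssrf"
  · subst h4; decide
  by_cases h5 : t = "command injection"
  · subst h5; decide
  by_cases h6 : t = "file upload"
  · subst h6; decide
  by_cases h7 : t = "xss"
  · subst h7; decide
  by_cases h8 : t = "denial of service"
  · subst h8; decide
  by_cases h9 : t = "resource exhaustion"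
  · subst h9; decide
  by_cases h10 : t = "authentication bypass"
  · subst h10; decide
  simp [pvTriggers, PySem.Dict.getD, PySem.Dict.get?, h1, h2, h3, h4, h5, h6, h7, h8, h9, h10, Ne.symm h1, Ne.symm h2, Ne.symm h3, Ne.symm h4, Ne.symm h5, Ne.symm h6, Ne.symm h7, Ne.symm h8, Ne.symm h9, Ne.symm h10]

theorem pv_trig_reg (t : String) :
    "regulatory_impact" ∈ pvTriggers.getD t [] ↔
      t ∈ ["sql injection", "information disclosure", "authentication bypass"] := by
  by_cases h1 : t = "sql injection"
  · subst h1; decide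
  by_cases h2 : t = "path traversal"
  · subst h2; decide
  by_cases h3 : t = "information disclosure"
  · subst h3; decide
  by_cases h4 : t = "ssrf"
  · subst h4; decide
  by_cases h5 : t = "command injection"
  · subst h5; decide
  by_cases h6 : t = "file upload"
  · subst h6; decide
  by_cases h7 : t = "xss"
  · subst h7; decide
  by_cases h8 : t = "denial of service"
  · subst h8; decide
  by_cases h9 : t = "resource exhaustion"
  · subst h9; decide
  by_cases h10 : t = "authentication bypass"
  · subst h10; decide
  simp [pvTriggers, PySem.Dict.getD, PySem.Dict.get?, h1, h2, h3, h4, h5, h6, h7, h8, h9, h10, Ne.symm h1, Ne.symm h2, Ne.symm h3, Ne.symm h4, Ne.symm h5, Ne.symm h6, Ne.symm h7, Ne.symm h8, Ne.symm h9, Ne.symm h10]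

-- Proof-only helper definitions and lemmas

-- the lowered type list and A's four trigger conditions
def pvTypes (vulnerabilities : List (List (String × String))) : List String :=
  vulnerabilities.map (fun v => PySem.Str.lower ((PySem.Dict.mk v).getD "type" ""))

def pvC1 (ts : List String) : Bool :=
  ts.any (fun vt => vt ∈ ["sql injection", "path traversal", "information disclosure", "ssrf"])
def pvC2 (ts : List String) : Bool :=
  ts.any (fun vt => vt ∈ ["sql injection", "command injection", "file upload", "xss"])
def pvC3 (ts : List String) : Bool :=
  ts.any (fun vt => vt ∈ ["command injection", "denial of service", "resource exhaustion"])
def pvC4 (ts : List String) : Bool :=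
  ts.any (fun vt => vt ∈ ["sql injection", "information disclosure", "authentication bypass"])

-- A's initial dict and one conditional update block of A
def pvD0 : PySem.Dict String String := PySem.Dict.ofList
  [("confidentiality", "Low"), ("integrity", "Low"), ("availability", "Low"),
   ("financial_impact", "Low"), ("regulatory_impact", "Low"), ("reputation_impact", "Low")]

def pvStage (d : PySem.Dict String String) (c : Bool) (k : String) (r hi med : Int) :
    PySem.Dict String String :=
  if c = true then
    (if r ≥ hi then d.insert k "High" else if r ≥ med then d.insert k "Medium" else d)
  else d

def pvLvl (c : Bool) (r hi med : Int) : String :=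
  if c = true then (if r ≥ hi then "High" else if r ≥ med then "Medium" else "Low") else "Low"

-- B's triggered-dimension set
def pvTrigSet (vulnerabilities : List (List (String × String))) : PySem.Set String :=
  vulnerabilities.foldl
    (fun s v => PySem.Set.update s
      (pvTriggers.getD (PySem.Str.lower ((PySem.Dict.mk v).getD "type" "")) []))
    (PySem.Set.ofList ["financial_impact", "reputation_impact"])

-- A is definitionally the composition of six stage blocks
theorem A_eq (r : Int) (vs : List (List (String × String))) :
    calculate_business_impact r vs =
      (pvStage (pvStage (pvStage (pvStage (pvStage (pvStage pvD0
        (pvC1 (pvTypes vs)) "confidentiality" r 70 40)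
        (pvC2 (pvTypes vs)) "integrity" r 70 40)
        (pvC3 (pvTypes vs)) "availability" r 70 40)
        true "financial_impact" r 80 50)
        (pvC4 (pvTypes vs)) "regulatory_impact" r 60 30)
        true "reputation_impact" r 70 40).items := rfl

-- B is definitionally the threshold fold over its triggered set
theorem B_eq (r : Int) (vs : List (List (String × String))) :
    calculate_business_impact_alt r vs =
      (pvThresholds.foldl
        (fun (impact : PySem.Dict String String) e =>
          if ((pvTrigSet vs).contains e.1 && decide (r ≥ e.2.1)) = true then impact.insert e.1 "High"
          else if ((pvTrigSet vs).contains e.1 && decide (r ≥ e.2.2)) = true then impact.insert e.1 "Medium"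
          else impact.insert e.1 "Low")
        PySem.Dict.empty).items := rfl

theorem getD_pvStage (d : PySem.Dict String String) (c : Bool) (k : String) (r hi med : Int)
    (k' : String) :
    (pvStage d c k r hi med).getD k' "" =
      if k' = k then
        (if c = true then (if r ≥ hi then "High" else if r ≥ med then "Medium" else d.getD k' "")
         else d.getD k' "")
      else d.getD k' "" := by
  unfold pvStage
  split_ifs <;> simp_all [PySem.Dict.getD_insert]

theorem keys_pvStage (d : PySem.Dict String String) (c : Bool) (k : String) (r hi med : Int)
    (h : d.contains k = true) : (pvStage d c k r hi med).keys = d.keys := by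
  unfold pvStage
  split_ifs <;> simp [PySem.Dict.keys_insert_of_contains, h]

theorem pvA_items (r : Int) (c1 c2 c3 c4 : Bool) :
    (pvStage (pvStage (pvStage (pvStage (pvStage (pvStage pvD0
      c1 "confidentiality" r 70 40) c2 "integrity" r 70 40) c3 "availability" r 70 40)
      true "financial_impact" r 80 50) c4 "regulatory_impact" r 60 30)
      true "reputation_impact" r 70 40).items =
    [("confidentiality", pvLvl c1 r 70 40), ("integrity", pvLvl c2 r 70 40),
     ("availability", pvLvl c3 r 70 40), ("financial_impact", pvLvl true r 80 50),
     ("regulatory_impact", pvLvl c4 r 60 30), ("reputation_impact", pvLvl true r 70 40)] := by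
  have k1 := keys_pvStage pvD0 c1 "confidentiality" r 70 40 (by decide)
  have h2 : (pvStage pvD0 c1 "confidentiality" r 70 40).contains "integrity" = true := by
    rw [PySem.Dict.contains_eq_decide_mem_keys, k1]; decide
  have k2 := keys_pvStage _ c2 "integrity" r 70 40 h2
  have h3 : (pvStage (pvStage pvD0 c1 "confidentiality" r 70 40) c2 "integrity" r 70 40).contains
      "availability" = true := by
    rw [PySem.Dict.contains_eq_decide_mem_keys, k2, k1]; decide
  have k3 := keys_pvStage _ c3 "availability" r 70 40 h3
  have h4 : (pvStage (pvStage (pvStage pvD0 c1 "confidentiality" r 70 40) c2 "integrity" r 70 40)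
      c3 "availability" r 70 40).contains "financial_impact" = true := by
    rw [PySem.Dict.contains_eq_decide_mem_keys, k3, k2, k1]; decide
  have k4 := keys_pvStage _ true "financial_impact" r 80 50 h4
  have h5 : (pvStage (pvStage (pvStage (pvStage pvD0 c1 "confidentiality" r 70 40) c2 "integrity"
      r 70 40) c3 "availability" r 70 40) true "financial_impact" r 80 50).contains
      "regulatory_impact" = true := by
    rw [PySem.Dict.contains_eq_decide_mem_keys, k4, k3, k2, k1]; decide
  have k5 := keys_pvStage _ c4 "regulatory_impact" r 60 30 h5
  have h6 : (pvStage (pvStage (pvStage (pvStage (pvStage pvD0 c1 "confidentiality" r 70 40) c2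
      "integrity" r 70 40) c3 "availability" r 70 40) true "financial_impact" r 80 50) c4
      "regulatory_impact" r 60 30).contains "reputation_impact" = true := by
    rw [PySem.Dict.contains_eq_decide_mem_keys, k5, k4, k3, k2, k1]; decide
  have k6 := keys_pvStage _ true "reputation_impact" r 70 40 h6
  have hkeys : (pvStage (pvStage (pvStage (pvStage (pvStage (pvStage pvD0
      c1 "confidentiality" r 70 40) c2 "integrity" r 70 40) c3 "availability" r 70 40)
      true "financial_impact" r 80 50) c4 "regulatory_impact" r 60 30)
      true "reputation_impact" r 70 40).keys =
      ["confidentiality", "integrity", "availability", "financial_impact", "regulatory_impact",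
       "reputation_impact"] := by
    rw [k6, k5, k4, k3, k2, k1]; decide
  rw [PySem.Dict.items_eq_map_keys _ (by rw [hkeys]; decide) ""]
  rw [hkeys]
  simp only [List.map_cons, List.map_nil]
  simp [getD_pvStage, pvLvl,
    (by decide : pvD0.getD "confidentiality" "" = "Low"),
    (by decide : pvD0.getD "integrity" "" = "Low"),
    (by decide : pvD0.getD "availability" "" = "Low"),
    (by decide : pvD0.getD "financial_impact" "" = "Low"),
    (by decide : pvD0.getD "regulatory_impact" "" = "Low"),
    (by decide : pvD0.getD "reputation_impact" "" = "Low")]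

theorem pvB_items (r : Int) (trig : PySem.Set String) :
    (pvThresholds.foldl
      (fun (impact : PySem.Dict String String) e =>
        if (trig.contains e.1 && decide (r ≥ e.2.1)) = true then impact.insert e.1 "High"
        else if (trig.contains e.1 && decide (r ≥ e.2.2)) = true then impact.insert e.1 "Medium"
        else impact.insert e.1 "Low")
      PySem.Dict.empty).items =
    pvThresholds.map (fun e => (e.1,
      if (trig.contains e.1 && decide (r ≥ e.2.1)) = true then "High"
      else if (trig.contains e.1 && decide (r ≥ e.2.2)) = true then "Medium" else "Low")) := by
  have hfun : (fun (impact : PySem.Dict String String) (e : String × Int × Int) =>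
      if (trig.contains e.1 && decide (r ≥ e.2.1)) = true then impact.insert e.1 "High"
      else if (trig.contains e.1 && decide (r ≥ e.2.2)) = true then impact.insert e.1 "Medium"
      else impact.insert e.1 "Low")
      = (fun (impact : PySem.Dict String String) (e : String × Int × Int) =>
          impact.insert e.1 (if (trig.contains e.1 && decide (r ≥ e.2.1)) = true then "High"
            else if (trig.contains e.1 && decide (r ≥ e.2.2)) = true then "Medium" else "Low")) := by
    funext impact e; split_ifs <;> rfl
  rw [hfun, PySem.Dict.items_foldl_insert_fresh]
  · rfl
  · intro a _; rfl
  · decide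

theorem pvVal (c : Bool) (r hi med : Int) :
    (if (c && decide (r ≥ hi)) = true then "High"
     else if (c && decide (r ≥ med)) = true then "Medium" else "Low") = pvLvl c r hi med := by
  cases c <;> simp [pvLvl]

-- B's set-membership conditions coincide with A's keyword scans
theorem contains_conf (vs : List (List (String × String))) :
    (pvTrigSet vs).contains "confidentiality" = pvC1 (pvTypes vs) := by
  unfold pvTrigSet pvC1 pvTypes
  have hfold : (vs.map (fun v => PySem.Str.lower ((PySem.Dict.mk v).getD "type" ""))).foldl
      (fun s t => PySem.Set.update s (pvTriggers.getD t []))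
      (PySem.Set.ofList ["financial_impact", "reputation_impact"])
      = vs.foldl
      (fun s v => PySem.Set.update s (pvTriggers.getD (PySem.Str.lower ((PySem.Dict.mk v).getD "type" "")) []))
      (PySem.Set.ofList ["financial_impact", "reputation_impact"]) := by
    rw [List.foldl_map]
  rw [← hfold]
  simp only [PySem.Set.contains_eq_listContains, List.contains_eq_mem]
  rw [Bool.eq_iff_iff]
  simp [pv_mem_tacc, pv_trig_conf, List.any_eq_true]

theorem contains_integ (vs : List (List (String × String))) :
    (pvTrigSet vs).contains "integrity" = pvC2 (pvTypes vs) := by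
  unfold pvTrigSet pvC2 pvTypes
  have hfold : (vs.map (fun v => PySem.Str.lower ((PySem.Dict.mk v).getD "type" ""))).foldl
      (fun s t => PySem.Set.update s (pvTriggers.getD t []))
      (PySem.Set.ofList ["financial_impact", "reputation_impact"])
      = vs.foldl
      (fun s v => PySem.Set.update s (pvTriggers.getD (PySem.Str.lower ((PySem.Dict.mk v).getD "type" "")) []))
      (PySem.Set.ofList ["financial_impact", "reputation_impact"]) := by
    rw [List.foldl_map]
  rw [← hfold]
  simp only [PySem.Set.contains_eq_listContains, List.contains_eq_mem]
  rw [Bool.eq_iff_iff]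
  simp [pv_mem_tacc, pv_trig_integ, List.any_eq_true]

theorem contains_avail (vs : List (List (String × String))) :
    (pvTrigSet vs).contains "availability" = pvC3 (pvTypes vs) := by
  unfold pvTrigSet pvC3 pvTypes
  have hfold : (vs.map (fun v => PySem.Str.lower ((PySem.Dict.mk v).getD "type" ""))).foldl
      (fun s t => PySem.Set.update s (pvTriggers.getD t []))
      (PySem.Set.ofList ["financial_impact", "reputation_impact"])
      = vs.foldl
      (fun s v => PySem.Set.update s (pvTriggers.getD (PySem.Str.lower ((PySem.Dict.mk v).getD "type" "")) []))
      (PySem.Set.ofList ["financial_impact", "reputation_impact"]) := by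
    rw [List.foldl_map]
  rw [← hfold]
  simp only [PySem.Set.contains_eq_listContains, List.contains_eq_mem]
  rw [Bool.eq_iff_iff]
  simp [pv_mem_tacc, pv_trig_avail, List.any_eq_true]

theorem contains_reg (vs : List (List (String × String))) :
    (pvTrigSet vs).contains "regulatory_impact" = pvC4 (pvTypes vs) := by
  unfold pvTrigSet pvC4 pvTypes
  have hfold : (vs.map (fun v => PySem.Str.lower ((PySem.Dict.mk v).getD "type" ""))).foldl
      (fun s t => PySem.Set.update s (pvTriggers.getD t []))
      (PySem.Set.ofList ["financial_impact", "reputation_impact"])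
      = vs.foldl
      (fun s v => PySem.Set.update s (pvTriggers.getD (PySem.Str.lower ((PySem.Dict.mk v).getD "type" "")) []))
      (PySem.Set.ofList ["financial_impact", "reputation_impact"]) := by
    rw [List.foldl_map]
  rw [← hfold]
  simp only [PySem.Set.contains_eq_listContains, List.contains_eq_mem]
  rw [Bool.eq_iff_iff]
  simp [pv_mem_tacc, pv_trig_reg, List.any_eq_true]

theorem contains_fin (vs : List (List (String × String))) :
    (pvTrigSet vs).contains "financial_impact" = true := by
  unfold pvTrigSet
  have hfold : (vs.map (fun v => PySem.Str.lower ((PySem.Dict.mk v).getD "type" ""))).foldl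
      (fun s t => PySem.Set.update s (pvTriggers.getD t []))
      (PySem.Set.ofList ["financial_impact", "reputation_impact"])
      = vs.foldl
      (fun s v => PySem.Set.update s (pvTriggers.getD (PySem.Str.lower ((PySem.Dict.mk v).getD "type" "")) []))
      (PySem.Set.ofList ["financial_impact", "reputation_impact"]) := by
    rw [List.foldl_map]
  rw [← hfold]
  simp only [PySem.Set.contains_eq_listContains, List.contains_eq_mem, decide_eq_true_eq,
    pv_mem_tacc, PySem.Set.mem_ofList]
  simp

theorem contains_rep (vs : List (List (String × String))) :
    (pvTrigSet vs).contains "reputation_impact" = true := by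
  unfold pvTrigSet
  have hfold : (vs.map (fun v => PySem.Str.lower ((PySem.Dict.mk v).getD "type" ""))).foldl
      (fun s t => PySem.Set.update s (pvTriggers.getD t []))
      (PySem.Set.ofList ["financial_impact", "reputation_impact"])
      = vs.foldl
      (fun s v => PySem.Set.update s (pvTriggers.getD (PySem.Str.lower ((PySem.Dict.mk v).getD "type" "")) []))
      (PySem.Set.ofList ["financial_impact", "reputation_impact"]) := by
    rw [List.foldl_map]
  rw [← hfold]
  simp only [PySem.Set.contains_eq_listContains, List.contains_eq_mem, decide_eq_true_eq,
    pv_mem_tacc, PySem.Set.mem_ofList]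
  simp

-- ===== VERDICT (by name: the statement is the Claim_ definition above) =====
theorem calculate_business_impact_spec : Claim_equal_calculate_business_impact := by
  intro risk_score vulnerabilities _
  unfold Spec_calculate_business_impact
  rw [A_eq, B_eq, pvA_items, pvB_items]
  simp only [pvThresholds, List.map_cons, List.map_nil]
  rw [contains_conf, contains_integ, contains_avail, contains_reg, contains_fin, contains_rep]
  simp only [pvVal]
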